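-- pv_equiv track=rewrite | github.com/georgelealch/codicaPython_Modulo01 | M01 - listas - 11.ListasAnidadas.py | get_super_series_winner
-- ===== SOURCE A (Python) =====
-- def get_super_series_winner(scores):
--     # Inicializamos los contadores de victorias para cada equipo
--     wins_south_america = 0
--     wins_europe = 0
--
--     # Recorremos la lista de resultados partido por partido
--     for match in scores:
--         # match es una lista como [3, 1]
--         # match[0] son los goles de Sudamérica
--         # match[1] son los goles de Europa
--
--         if match[0] > match[1]:
--             wins_south_america += 1
--         elif match[1] > match[0]:
--             wins_europe += 1
--         # Si empatan (else), no sumamos victoria a ninguno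
--
--     # Al final del ciclo, comparamos quién ganó más partidos
--     if wins_south_america > wins_europe:
--         return 'sudamerica'
--     elif wins_europe > wins_south_america:
--         return 'europa'
--     else:
--         return None
-- ===== SOURCE B (Python) =====
-- def get_super_series_winner(scores):
--     # Boyer-Moore majority vote (pair cancellation) over the non-tie matches:
--     # opposite votes cancel; the surviving candidate with a positive count is
--     # the side with strictly more wins (with two vote values this is exact).
--     cand, count = None, 0
--     for m in scores:
--         if m[0] == m[1]:
--             continue
--         vote = 'sudamerica' if m[0] > m[1] else 'europa'
--         if count == 0:
--             cand, count = vote, 1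
--         elif vote == cand:
--             count += 1
--         else:
--             count -= 1
--     return cand if count > 0 else None
-- ===== Notes on version B (the rewrite author's own statement) =====
-- stated objective: alternative
-- what changed: Replaces A's two win tallies compared at the end with a Boyer-Moore majority-vote pair-cancellation pass (candidate + nonnegative cancellation count), which is exact here because each match casts one of only two possible votes.
import Mathlib
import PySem

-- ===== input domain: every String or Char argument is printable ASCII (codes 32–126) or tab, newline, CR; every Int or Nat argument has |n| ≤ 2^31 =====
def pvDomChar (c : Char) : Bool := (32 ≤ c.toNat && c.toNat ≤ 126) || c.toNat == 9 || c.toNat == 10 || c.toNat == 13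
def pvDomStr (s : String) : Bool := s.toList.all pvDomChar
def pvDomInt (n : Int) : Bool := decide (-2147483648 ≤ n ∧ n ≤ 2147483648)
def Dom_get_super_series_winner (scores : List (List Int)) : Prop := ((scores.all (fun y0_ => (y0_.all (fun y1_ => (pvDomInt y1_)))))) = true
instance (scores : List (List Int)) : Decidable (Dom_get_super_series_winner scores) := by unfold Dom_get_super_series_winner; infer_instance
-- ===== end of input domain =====

-- B decides the winner by Boyer-Moore pair cancellation (candidate + count) instead of A's two win tallies; objective: alternative.


-- ===== PORT A =====
-- two win counters, updated match by match (m[0]/m[1] via pyGet?; Pre_ keeps them in range)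
def get_super_series_winner (scores : List (List Int)) : Option String :=
  let st := scores.foldl (fun (p : Int × Int) m =>
    match PySem.List.pyGet? m 0, PySem.List.pyGet? m 1 with
    | some a, some b =>
        if a > b then (p.1 + 1, p.2)
        else if b > a then (p.1, p.2 + 1)
        else p
    | _, _ => p) (0, 0)
  if st.1 > st.2 then some "sudamerica"
  else if st.2 > st.1 then some "europa"
  else none

-- ===== PORT B =====
-- Boyer-Moore majority vote over the non-tie matches: candidate + cancellation count
def get_super_series_winner_alt (scores : List (List Int)) : Option String :=
  let st := scores.foldl (fun (st : Option String × Int) m =>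
    match m with
    | a :: b :: _ =>
        if a = b then st
        else
          let vote := if a > b then "sudamerica" else "europa"
          if st.2 = 0 then (some vote, 1)
          else if some vote = st.1 then (st.1, st.2 + 1)
          else (st.1, st.2 - 1)
    | _ => st) (none, 0)
  if st.2 > 0 then st.1 else none

-- ===== PRECONDITION & SPEC =====
-- Pre_ excludes exactly the inputs where Python A raises IndexError (an inner list of length < 2).
def Pre_get_super_series_winner (scores : List (List Int)) : Prop :=
  ∀ m ∈ scores, 2 ≤ m.length
instance (scores : List (List Int)) : Decidable (Pre_get_super_series_winner scores) := by unfold Pre_get_super_series_winner; infer_instance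
def pvWitness_get_super_series_winner : List (List Int) := [[3, 1], [0, 0], [1, 2]]

def Spec_get_super_series_winner (scores : List (List Int)) (out : Option String) : Prop := out = get_super_series_winner_alt scores
instance (scores : List (List Int)) (out : Option String) : Decidable (Spec_get_super_series_winner scores out) := by unfold Spec_get_super_series_winner; infer_instance

-- ===== CLAIM (what is proved, stated in full; the proofs are below) =====
def Claim_equal_get_super_series_winner : Prop := ∀ (scores : List (List Int)), Dom_get_super_series_winner scores → Pre_get_super_series_winner scores → Spec_get_super_series_winner scores (get_super_series_winner scores)

-- ===== LEMMAS AND PROOFS =====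

-- A's fold step (two tallies)
def pvStepA (p : Int × Int) (m : List Int) : Int × Int :=
  match PySem.List.pyGet? m 0, PySem.List.pyGet? m 1 with
  | some a, some b =>
      if a > b then (p.1 + 1, p.2)
      else if b > a then (p.1, p.2 + 1)
      else p
  | _, _ => p

-- B's fold step (Boyer-Moore)
def pvStepB (st : Option String × Int) (m : List Int) : Option String × Int :=
  match m with
  | a :: b :: _ =>
      if a = b then st
      else
        let vote := if a > b then "sudamerica" else "europa"
        if st.2 = 0 then (some vote, 1)
        else if some vote = st.1 then (st.1, st.2 + 1)
        else (st.1, st.2 - 1)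
  | _ => st

-- the invariant tying B's (candidate, count) to A's (s, e)
def pvInv (st : Option String × Int) (p : Int × Int) : Prop :=
  0 ≤ st.2 ∧ (st.1 = none → st.2 = 0) ∧
  (st.1 = none ∨ st.1 = some "sudamerica" ∨ st.1 = some "europa") ∧
  (if st.1 = some "sudamerica" then st.2 else -st.2) = p.1 - p.2

theorem pv_inv_preserved (scores : List (List Int)) (st : Option String × Int) (p : Int × Int)
    (h : pvInv st p) : pvInv (scores.foldl pvStepB st) (scores.foldl pvStepA p) := by
  induction scores generalizing st p with
  | nil => simpa using h
  | cons m t ih =>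
    simp only [List.foldl_cons]
    apply ih
    obtain ⟨h0, h1, h2, h3⟩ := h
    match m with
    | [] =>
      have e0 : PySem.List.pyGet? ([] : List Int) 0 = none := by decide
      simp only [pvStepA, pvStepB, e0]
      exact ⟨h0, h1, h2, h3⟩
    | [a] =>
      have e1 : PySem.List.pyGet? [a] 1 = none := by
        simp [PySem.List.pyGet?_eq_none_iff, PySem.Raise.InRange]
      simp only [pvStepA, pvStepB, PySem.List.pyGet?_zero_cons, e1]
      exact ⟨h0, h1, h2, h3⟩
    | a :: b :: r =>
      have e0 : PySem.List.pyGet? (a :: b :: r) 0 = some a := PySem.List.pyGet?_zero_cons a (b :: r)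
      have e1 : PySem.List.pyGet? (a :: b :: r) 1 = some b := by
        have := PySem.List.pyGet?_cons_succ (x := a) (xs := b :: r) (n := 0)
        simp [PySem.List.pyGet?_zero_cons] at this
        simpa using this
      simp only [pvStepA, pvStepB, e0, e1]
      by_cases heq : a = b
      · simp only [if_pos heq, if_neg (show ¬ a > b by omega), if_neg (show ¬ b > a by omega)]
        exact ⟨h0, h1, h2, h3⟩
      · simp only [if_neg heq]
        by_cases hab : a > b
        · -- vote = "sudamerica"
          simp only [if_pos hab]
          by_cases hz : st.2 = 0
          · have hval : (if st.1 = some "sudamerica" then st.2 else -st.2) = 0 := by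
              split <;> omega
            rw [hval] at h3
            simp only [if_pos hz]
            refine ⟨by norm_num, by simp, by simp, ?_⟩
            simp; omega
          · simp only [if_neg hz]
            by_cases hc : some "sudamerica" = st.1
            · simp only [if_pos hc]
              rw [if_pos hc.symm] at h3
              refine ⟨by omega, ?_, Or.inr (Or.inl hc.symm), ?_⟩
              · intro hn; rw [hn] at hc; simp at hc
              · simp only [hc.symm]; simp; omega
            · simp only [if_neg hc]
              have hne : ¬ st.1 = some "sudamerica" := fun h => hc h.symm
              rw [if_neg hne] at h3
              refine ⟨by omega, fun hn => False.elim (hz (h1 hn)), h2, ?_⟩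
              rw [if_neg hne]; omega
        · -- vote = "europa"
          have hba : b > a := by omega
          simp only [if_neg hab, if_pos hba]
          by_cases hz : st.2 = 0
          · have hval : (if st.1 = some "sudamerica" then st.2 else -st.2) = 0 := by
              split <;> omega
            rw [hval] at h3
            simp only [if_pos hz]
            refine ⟨by norm_num, by simp, by simp, ?_⟩
            simp; omega
          · simp only [if_neg hz]
            by_cases hc : some "europa" = st.1
            · simp only [if_pos hc]
              have hne : ¬ st.1 = some "sudamerica" := by rw [← hc]; simp
              rw [if_neg hne] at h3
              refine ⟨by omega, fun hn => by rw [hn] at hc; simp at hc, Or.inr (Or.inr hc.symm), ?_⟩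
              rw [if_neg hne]; omega
            · simp only [if_neg hc]
              -- candidate is not europa and count ≠ 0, so (by h1,h2) it is sudamerica
              have hsud : st.1 = some "sudamerica" := by
                rcases h2 with hn | hs | he
                · exact absurd (h1 hn) hz
                · exact hs
                · exact absurd he.symm hc
              rw [if_pos hsud] at h3
              refine ⟨by omega, fun hn => by rw [hn] at hsud; simp at hsud, Or.inr (Or.inl hsud), ?_⟩
              rw [if_pos hsud]; omega

-- ===== VERDICT (by name: the statement is the Claim_ definition above) =====
theorem get_super_series_winner_spec : Claim_equal_get_super_series_winner := by
  intro scores _ _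
  unfold Spec_get_super_series_winner get_super_series_winner get_super_series_winner_alt
  have h := pv_inv_preserved scores (none, 0) (0, 0) (by simp [pvInv])
  simp only [show (fun (p : Int × Int) m =>
      match PySem.List.pyGet? m 0, PySem.List.pyGet? m 1 with
      | some a, some b =>
          if a > b then (p.1 + 1, p.2)
          else if b > a then (p.1, p.2 + 1)
          else p
      | _, _ => p) = pvStepA from rfl,
    show (fun (st : Option String × Int) m =>
      match m with
      | a :: b :: _ =>
          if a = b then st
          else
            let vote := if a > b then "sudamerica" else "europa"
            if st.2 = 0 then (some vote, 1)
            else if some vote = st.1 then (st.1, st.2 + 1)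
            else (st.1, st.2 - 1)
      | _ => st) = pvStepB from rfl]
  set st := scores.foldl pvStepB (none, 0) with hst
  set p := scores.foldl pvStepA (0, 0) with hp
  obtain ⟨h0, h1, h2, h3⟩ := h
  by_cases hz : st.2 > 0
  · rw [if_pos hz]
    rcases h2 with hn | hs | he
    · exact absurd (h1 hn) (by omega)
    · rw [if_pos hs] at h3
      rw [if_pos (show p.1 > p.2 by omega), hs]
    · have hne : ¬ st.1 = some "sudamerica" := by rw [he]; simp
      rw [if_neg hne] at h3
      rw [if_neg (show ¬ p.1 > p.2 by omega), if_pos (show p.2 > p.1 by omega), he]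
  · rw [if_neg hz]
    have : st.2 = 0 := by omega
    have hpe : p.1 = p.2 := by
      rw [this] at h3; split at h3 <;> omega
    rw [if_neg (by omega), if_neg (by omega)]
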